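-- pv_equiv track=rewrite | github.com/MegaGiciorPortas/WDI-Zadania | 02-tablice_jednowymiarowe/2.90_v2.py | indeks_najwiekszej_liczby
-- ===== SOURCE A (Python) =====
-- def czy_pierwsza(n):
--     if n <= 1:
--         return False
--     if n <= 3:
--         return True
--     if n % 2 == 0 or n % 3 == 0:
--         return False
--     i = 5
--     while i * i <= n:
--         if n % i == 0 or n % (i + 2) == 0:
--             return False
--         i += 6
--     return True
--
-- def indeks_najwiekszej_liczby(T):
--     iloczyn = 1
--     najwieksza_liczba = 0
--     najwiekszy_indeks = -1
--
--     for i in range(len(T)):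
--         if iloczyn == T[i]:
--             if T[i] > najwieksza_liczba:
--                 najwieksza_liczba = T[i]
--                 najwiekszy_indeks = i
--         if czy_pierwsza(T[i]):
--             if iloczyn == 0:
--                 iloczyn = T[i]
--             else:
--                 iloczyn *= T[i]
--
--     if najwiekszy_indeks == -1:
--         return None
--     return najwiekszy_indeks
-- ===== SOURCE B (Python) =====
-- def czy_pierwsza(n):
--     if n <= 1:
--         return False
--     if n <= 3:
--         return True
--     if n % 2 == 0 or n % 3 == 0:
--         return False
--     i = 5
--     while i * i <= n:
--         if n % i == 0 or n % (i + 2) == 0: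
--             return False
--         i += 6
--     return True
--
-- def indeks_najwiekszej_liczby(T):
--     # first pass: prefix[i] = product of the primes strictly before index i
--     prefix = []
--     p = 1
--     for x in T:
--         prefix.append(p)
--         if czy_pierwsza(x):
--             p *= x
--     # second pass: largest element equal to its prefix product, first occurrence
--     best_i = None
--     best_v = 0
--     for i in range(len(T)):
--         if prefix[i] == T[i] and T[i] > best_v:
--             best_v = T[i]
--             best_i = i
--     return best_i
-- ===== Notes on version B (the rewrite author's own statement) =====
-- stated objective: alternative
-- what changed: B precomputes a prefix array of the running prime product in one pass and then scans it with a best-value/best-index accumulator, instead of interleaving product maintenance with the maximum search; it drops A's dead iloczyn==0 branch (the product of primes is never 0).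
import Mathlib
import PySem

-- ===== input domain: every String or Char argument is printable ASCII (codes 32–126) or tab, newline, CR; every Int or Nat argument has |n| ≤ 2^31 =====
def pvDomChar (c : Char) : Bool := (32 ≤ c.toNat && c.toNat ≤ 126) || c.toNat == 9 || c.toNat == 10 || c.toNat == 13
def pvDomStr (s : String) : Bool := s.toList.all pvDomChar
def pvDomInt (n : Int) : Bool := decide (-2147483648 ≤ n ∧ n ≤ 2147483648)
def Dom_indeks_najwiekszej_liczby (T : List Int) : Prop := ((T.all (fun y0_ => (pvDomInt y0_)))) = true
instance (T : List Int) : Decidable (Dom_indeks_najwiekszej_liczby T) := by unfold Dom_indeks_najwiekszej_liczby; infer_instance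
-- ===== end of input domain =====

-- ===== PORT A =====
-- B rebuilds the result from a precomputed prefix list of prime products (two passes) instead of A's interleaved single pass; same values everywhere.
def trialLoop (n i : Int) : Bool :=
  if _h : i * i ≤ n then
    if PySem.Int.mod n i == 0 || PySem.Int.mod n (i + 2) == 0 then false
    else trialLoop n (i + 6)
  else true
termination_by (n + 1 - i).toNat
decreasing_by
  have hin : i ≤ n := by
    by_cases h0 : i ≤ 0
    · have := mul_self_nonneg i; omega
    · nlinarith
  omega

def czy_pierwsza (n : Int) : Bool :=
  if n ≤ 1 then false
  else if n ≤ 3 then true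
  else if PySem.Int.mod n 2 == 0 || PySem.Int.mod n 3 == 0 then false
  else trialLoop n 5

def loopA : List Int → Int → Int → Int → Int → (Int × Int × Int)
  | [], _, iloczyn, naj, idx => (iloczyn, naj, idx)
  | t :: rest, i, iloczyn, naj, idx =>
    let s := if iloczyn = t ∧ t > naj then (t, i) else (naj, idx)
    let iloczyn' := if czy_pierwsza t then (if iloczyn = 0 then t else iloczyn * t) else iloczyn
    loopA rest (i + 1) iloczyn' s.1 s.2

def indeks_najwiekszej_liczby (T : List Int) : Option Int :=
  let s := loopA T 0 1 0 (-1)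
  if s.2.2 = -1 then none else some s.2.2

-- ===== PORT B =====
def prefixProducts : List Int → Int → List Int
  | [], _ => []
  | x :: rest, p => p :: prefixProducts rest (if czy_pierwsza x then p * x else p)

def loopB : List (Int × Int) → Int → Option Int → Int → (Option Int × Int)
  | [], _, best_i, best_v => (best_i, best_v)
  | (pi, x) :: rest, i, best_i, best_v =>
    if pi = x ∧ x > best_v then loopB rest (i + 1) (some i) x
    else loopB rest (i + 1) best_i best_v

def indeks_najwiekszej_liczby_alt (T : List Int) : Option Int :=
  let pre := prefixProducts T 1
  (loopB (pre.zip T) 0 none 0).1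

-- ===== PRECONDITION & SPEC =====
def Spec_indeks_najwiekszej_liczby (T : List Int) (out : Option Int) : Prop := out = indeks_najwiekszej_liczby_alt T
instance (T : List Int) (out : Option Int) : Decidable (Spec_indeks_najwiekszej_liczby T out) := by unfold Spec_indeks_najwiekszej_liczby; infer_instance

-- ===== CLAIM (what is proved, stated in full; the proofs are below) =====
def Claim_equal_indeks_najwiekszej_liczby : Prop := ∀ (T : List Int), Dom_indeks_najwiekszej_liczby T → Spec_indeks_najwiekszej_liczby T (indeks_najwiekszej_liczby T)

-- ===== LEMMAS AND PROOFS =====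
theorem czy_pierwsza_two_le {n : Int} (h : czy_pierwsza n = true) : 2 ≤ n := by
  by_contra hn
  have : n ≤ 1 := by omega
  simp [czy_pierwsza, this] at h

theorem loop_eq (T : List Int) : ∀ (i p naj idx : Int), p ≠ 0 → 0 ≤ i →
    loopB ((prefixProducts T p).zip T) i (if idx = -1 then none else some idx) naj
      = ((if (loopA T i p naj idx).2.2 = -1 then none else some (loopA T i p naj idx).2.2),
         (loopA T i p naj idx).2.1) := by
  induction T with
  | nil => intro i p naj idx _ _; simp [prefixProducts, loopA, loopB]
  | cons x rest ih =>
    intro i p naj idx hp hi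
    simp only [prefixProducts, List.zip_cons_cons, loopB, loopA]
    have hp' : (if czy_pierwsza x then (if p = 0 then x else p * x) else p)
        = (if czy_pierwsza x then p * x else p) := by
      simp [hp]
    by_cases hc : p = x ∧ x > naj
    · simp only [if_pos hc]
      have hne : ¬ i = -1 := by omega
      have := ih (i + 1) (if czy_pierwsza x then p * x else p) x i
        (by
          by_cases hpr : czy_pierwsza x
          · have h2 := czy_pierwsza_two_le hpr
            simp [hpr]; exact ⟨hp, by omega⟩
          · simpa [hpr] using hp)
        (by omega)
      rw [if_neg hne] at this
      simpa [hp'] using this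
    · simp only [if_neg hc]
      have := ih (i + 1) (if czy_pierwsza x then p * x else p) naj idx
        (by
          by_cases hpr : czy_pierwsza x
          · have h2 := czy_pierwsza_two_le hpr
            simp [hpr]; exact ⟨hp, by omega⟩
          · simpa [hpr] using hp)
        (by omega)
      simpa [hp'] using this

-- ===== VERDICT (by name: the statement is the Claim_ definition above) =====
theorem indeks_najwiekszej_liczby_spec : Claim_equal_indeks_najwiekszej_liczby := by
  intro T _
  unfold Spec_indeks_najwiekszej_liczby indeks_najwiekszej_liczby indeks_najwiekszej_liczby_alt
  have h := loop_eq T 0 1 0 (-1) (by norm_num) (by norm_num)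
  norm_num at h
  simp [h]
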